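-- pv_equiv track=rewrite | github.com/ggaarder/knnreutersbdc2 | algo.py | global_ABCD
-- ===== SOURCE A (Python) =====
-- def global_ABCD(actual, expected):
--     # True Positive and classifier Positive
--     tp_cp = [None for [resu, corr] in zip(actual, expected)
--         if corr == resu]
--     A_cnt = len(tp_cp)
--
--     # True Positive and Classifier Negative
--     tp_cn = [None for [resu, corr] in zip(actual, expected)
--         if corr != resu  ]
--     B_cnt = len(tp_cn)
--
--     # True Negative and Classifier Positive
--     tn_cp = [None for [resu, corr] in zip(actual, expected)
--         if corr != resu ]
--     C_cnt = len(tn_cp)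
--
--     # True Negative and Classifier Negative
--     tn_cn = [None for [resu, corr] in zip(actual, expected)
--         if corr == resu ]
--     D_cnt = len(tn_cn)
--
--     return A_cnt, B_cnt, C_cnt, D_cnt
-- ===== SOURCE B (Python) =====
-- def global_ABCD(actual, expected):
--     matches = 0
--     mismatches = 0
--     for resu, corr in zip(actual, expected):
--         if corr == resu:
--             matches += 1
--         else:
--             mismatches += 1
--     return matches, mismatches, mismatches, matches
-- ===== Notes on version B (the rewrite author's own statement) =====
-- stated objective: simpler
-- what changed: Replaces four independent filtered comprehensions over zip (four scans building four throwaway lists of None) with one loop over the zipped pairs maintaining two counters, returning (matches, mismatches, mismatches, matches).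
import Mathlib
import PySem

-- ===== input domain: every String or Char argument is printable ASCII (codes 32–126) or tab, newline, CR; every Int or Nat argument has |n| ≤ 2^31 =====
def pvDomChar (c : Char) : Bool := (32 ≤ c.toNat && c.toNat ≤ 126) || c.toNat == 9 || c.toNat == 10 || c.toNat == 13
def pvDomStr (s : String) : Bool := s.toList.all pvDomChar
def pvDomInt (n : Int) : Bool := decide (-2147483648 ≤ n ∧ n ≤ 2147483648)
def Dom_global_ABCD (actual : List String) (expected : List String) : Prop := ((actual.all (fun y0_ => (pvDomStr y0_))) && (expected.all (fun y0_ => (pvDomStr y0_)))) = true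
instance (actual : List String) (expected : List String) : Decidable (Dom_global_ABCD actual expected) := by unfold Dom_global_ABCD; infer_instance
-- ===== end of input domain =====

-- B replaces A's four filtered comprehensions over zip with one fold keeping two counters (simpler, one pass).


-- ===== PORT A =====
-- four comprehensions over zip(actual, expected), each building a list of None and taking its length
def global_ABCD (actual : List String) (expected : List String) : Int × Int × Int × Int :=
  let pairs := actual.zip expected
  let tp_cp := (pairs.filter (fun p => p.2 == p.1)).map (fun _ => (none : Option Unit))
  let A_cnt : Int := tp_cp.length
  let tp_cn := (pairs.filter (fun p => p.2 != p.1)).map (fun _ => (none : Option Unit))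
  let B_cnt : Int := tp_cn.length
  let tn_cp := (pairs.filter (fun p => p.2 != p.1)).map (fun _ => (none : Option Unit))
  let C_cnt : Int := tn_cp.length
  let tn_cn := (pairs.filter (fun p => p.2 == p.1)).map (fun _ => (none : Option Unit))
  let D_cnt : Int := tn_cn.length
  (A_cnt, B_cnt, C_cnt, D_cnt)

-- ===== PORT B =====
-- one pass over the zipped pairs, two counters
def global_ABCD_alt (actual : List String) (expected : List String) : Int × Int × Int × Int :=
  let st := (actual.zip expected).foldl
    (fun (st : Int × Int) p => if p.2 == p.1 then (st.1 + 1, st.2) else (st.1, st.2 + 1))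
    (0, 0)
  (st.1, st.2, st.2, st.1)

-- ===== PRECONDITION & SPEC =====
def Spec_global_ABCD (actual : List String) (expected : List String) (out : Int × Int × Int × Int) : Prop := out = global_ABCD_alt actual expected
instance (actual : List String) (expected : List String) (out : Int × Int × Int × Int) : Decidable (Spec_global_ABCD actual expected out) := by unfold Spec_global_ABCD; infer_instance

-- ===== CLAIM (what is proved, stated in full; the proofs are below) =====
def Claim_equal_global_ABCD : Prop := ∀ (actual : List String) (expected : List String), Dom_global_ABCD actual expected → Spec_global_ABCD actual expected (global_ABCD actual expected)

-- ===== LEMMAS AND PROOFS =====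
theorem pv_fold_counts (l : List (String × String)) (a b : Int) :
    l.foldl (fun (st : Int × Int) p => if p.2 == p.1 then (st.1 + 1, st.2) else (st.1, st.2 + 1)) (a, b)
      = (a + (l.countP (fun p => p.2 == p.1) : Int),
         b + (l.countP (fun p => p.2 != p.1) : Int)) := by
  induction l generalizing a b with
  | nil => simp
  | cons x xs ih =>
      simp only [List.foldl_cons, List.countP_cons]
      by_cases h : (x.2 == x.1) = true
      · rw [if_pos h, ih]
        have hb : (x.2 != x.1) = false := by simp [bne, h]
        rw [h, hb]
        simp only [if_true, Prod.mk.injEq]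
        refine ⟨?_, ?_⟩ <;> push_cast <;> ring
      · rw [if_neg h, ih]
        have hb : (x.2 != x.1) = true := by simp [bne]; simpa using h
        rw [if_neg h, hb]
        simp only [if_true, Prod.mk.injEq]
        refine ⟨?_, ?_⟩ <;> push_cast <;> ring

-- ===== VERDICT (by name: the statement is the Claim_ definition above) =====
theorem global_ABCD_spec : Claim_equal_global_ABCD := by
  intro actual expected _
  unfold Spec_global_ABCD global_ABCD global_ABCD_alt
  simp only [pv_fold_counts, List.length_map]
  simp [List.countP_eq_length_filter]
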